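-- pv_equiv track=rewrite | github.com/pytorch/pytorch | .venv311/lib/python3.11/site-packages/sympy/core/logic.py | fuzzy_xor
-- ===== SOURCE A (Python) =====
-- def fuzzy_bool(x):
--     """Return True, False or None according to x.
--
--     Whereas bool(x) returns True or False, fuzzy_bool allows
--     for the None value and non-false values (which become None), too.
--
--     Examples
--     ========
--
--     >>> from sympy.core.logic import fuzzy_bool
--     >>> from sympy.abc import x
--     >>> fuzzy_bool(x), fuzzy_bool(None)
--     (None, None)
--     >>> bool(x), bool(None)
--     (True, False)
--
--     """
--     if x is None:
--         return None
--     if x in (True, False):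
--         return bool(x)
--
-- def fuzzy_xor(args):
--     """Return None if any element of args is not True or False, else
--     True (if there are an odd number of True elements), else False."""
--     t = 0
--     for a in args:
--         ai = fuzzy_bool(a)
--         if ai:
--             t += 1
--         elif ai is None:
--             return
--     return t % 2 == 1
-- ===== SOURCE B (Python) =====
-- def fuzzy_bool(x):
--     if x is None:
--         return None
--     if x in (True, False):
--         return bool(x)
--
-- def fuzzy_xor(args):
--     vals = list(args)
--     if any(fuzzy_bool(a) is None for a in vals):
--         return None
--     return sum(1 for a in vals if fuzzy_bool(a)) % 2 == 1
-- ===== Notes on version B (the rewrite author's own statement) =====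
-- stated objective: simpler
-- what changed: Replaces A's single accumulating scan (counter plus early return) with a detect-then-count decomposition: one pass checks for any None via any(), a second counts True values and takes parity.
import Mathlib
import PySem

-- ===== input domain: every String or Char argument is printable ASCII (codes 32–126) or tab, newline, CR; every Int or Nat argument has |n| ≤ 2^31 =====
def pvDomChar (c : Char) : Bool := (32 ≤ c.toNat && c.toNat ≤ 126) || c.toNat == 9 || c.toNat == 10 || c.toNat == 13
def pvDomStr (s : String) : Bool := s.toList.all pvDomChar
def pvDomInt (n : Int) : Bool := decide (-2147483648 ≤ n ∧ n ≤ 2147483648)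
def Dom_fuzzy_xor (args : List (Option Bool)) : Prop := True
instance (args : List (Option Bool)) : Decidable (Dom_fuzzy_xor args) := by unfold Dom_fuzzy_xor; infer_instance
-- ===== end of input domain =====

-- B replaces A's single accumulating scan with a detect-None pass followed by a count-and-parity pass (objective: simpler).

-- ===== PORT A =====
-- fuzzy_bool on an Option Bool argument: None stays None, a Bool stays itself
def fuzzy_bool (x : Option Bool) : Option Bool :=
  match x with
  | none => none
  | some b => some b

-- the loop of A: t is the running count of True elements
def fuzzy_xor_go (args : List (Option Bool)) (t : Int) : Option Bool :=
  match args with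
  | [] => some (t % 2 == 1)
  | a :: rest =>
    match fuzzy_bool a with
    | some true => fuzzy_xor_go rest (t + 1)   -- 'if ai: t += 1'
    | some false => fuzzy_xor_go rest t
    | none => none                             -- 'elif ai is None: return'

def fuzzy_xor (args : List (Option Bool)) : Option Bool :=
  fuzzy_xor_go args 0

-- ===== PORT B =====
def fuzzy_xor_alt (args : List (Option Bool)) : Option Bool :=
  if args.any (fun a => (fuzzy_bool a).isNone) then none
  else some (((args.countP (fun a => (fuzzy_bool a).getD false) : Int) % 2) == 1)

-- ===== PRECONDITION & SPEC =====
def Spec_fuzzy_xor (args : List (Option Bool)) (out : Option Bool) : Prop := out = fuzzy_xor_alt args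
instance (args : List (Option Bool)) (out : Option Bool) : Decidable (Spec_fuzzy_xor args out) := by unfold Spec_fuzzy_xor; infer_instance

-- ===== CLAIM (what is proved, stated in full; the proofs are below) =====
def Claim_equal_fuzzy_xor : Prop := ∀ (args : List (Option Bool)), Dom_fuzzy_xor args → Spec_fuzzy_xor args (fuzzy_xor args)

-- ===== LEMMAS AND PROOFS =====
lemma fuzzy_xor_go_eq (args : List (Option Bool)) : ∀ t : Int,
    fuzzy_xor_go args t =
      if args.any (fun a => (fuzzy_bool a).isNone) then none
      else some (((t + (args.countP (fun a => (fuzzy_bool a).getD false) : Int)) % 2) == 1) := by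
  induction args with
  | nil => intro t; simp [fuzzy_xor_go]
  | cons a rest ih =>
    intro t
    cases a with
    | none => simp [fuzzy_xor_go, fuzzy_bool]
    | some b =>
      cases b with
      | true =>
        simp only [fuzzy_xor_go, fuzzy_bool, ih, List.any_cons, List.countP_cons]
        simp only [Option.isNone, Option.getD, Bool.false_or, if_pos]
        split_ifs with h
        · rfl
        · congr 2
          push_cast
          ring
      | false =>
        simp only [fuzzy_xor_go, fuzzy_bool, ih, List.any_cons, List.countP_cons]
        simp [Option.isNone, Option.getD]

-- ===== VERDICT (by name: the statement is the Claim_ definition above) =====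
theorem fuzzy_xor_spec : Claim_equal_fuzzy_xor := by
  intro args _
  unfold Spec_fuzzy_xor fuzzy_xor fuzzy_xor_alt
  rw [fuzzy_xor_go_eq]
  simp
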